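-- pv_equiv track=rewrite | github.com/muhffikkri/daspro | tugas/Tipe bentukan set mahasiswa/lib_list_set.py | NbUnion
-- ===== SOURCE A (Python) =====
-- def FirstElmt(L) :
--     return L[0]
--
-- def Tail(L) :
--     return L[1:]
--
-- def IsEmpty(L) :
--     return L == []
--
-- def isMember(e, L) :
--     if IsEmpty(L) :
--         return False
--     else :
--         if e == FirstElmt(L) :
--             return True
--         else :
--             return isMember(e, Tail(L))
--
-- def NbUnion(H1, H2) :
--     if not IsEmpty(H1) and IsEmpty(H2) :
--         return 0
--     elif IsEmpty(H1) and not IsEmpty(H2) :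
--         return 0
--     else :
--         if isMember(FirstElmt(H1), H2) :
--             return 1 + NbUnion(Tail(H1), H2)
--         else :
--             return 2 + NbUnion(Tail(H1), H2)
-- ===== SOURCE B (Python) =====
-- def NbUnion(H1, H2):
--     if not H2:
--         return 0
--     members = set(H2)
--     total = 0
--     for x in H1:
--         total += 1 if x in members else 2
--     return total
-- ===== Notes on version B (the rewrite author's own statement) =====
-- stated objective: faster
-- what changed: Replaces A's double recursion (recursive membership scan inside a recursive sum) with one pass over H1 accumulating 1/2 against a set built once from H2.
-- outside the precondition, e.g. on NbUnion([], []): A raises IndexError, B returns 0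
-- crash fix: A raises IndexError when both H1 and H2 are empty (it reads H1[0]); B returns 0 there. — e.g. on NbUnion([], []): A raises IndexError, B returns 0
import Mathlib
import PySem

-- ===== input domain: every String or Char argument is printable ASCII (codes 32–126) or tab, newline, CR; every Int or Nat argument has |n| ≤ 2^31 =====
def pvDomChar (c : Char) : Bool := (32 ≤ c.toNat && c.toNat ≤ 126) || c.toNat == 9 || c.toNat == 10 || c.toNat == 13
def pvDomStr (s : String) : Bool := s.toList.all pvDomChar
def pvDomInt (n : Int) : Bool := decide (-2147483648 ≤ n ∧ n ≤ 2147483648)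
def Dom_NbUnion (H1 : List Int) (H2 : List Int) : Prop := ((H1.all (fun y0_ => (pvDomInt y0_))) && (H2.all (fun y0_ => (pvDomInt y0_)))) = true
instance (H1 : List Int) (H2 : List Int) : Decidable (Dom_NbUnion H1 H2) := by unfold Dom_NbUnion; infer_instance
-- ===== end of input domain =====

-- B replaces A's recursive membership scan inside a recursive sum by a single
-- accumulating pass over H1 against a set built once from H2 (faster per the
-- timing run's asymptotic change claim; see claim.json).


-- ===== PORT A =====
def isMemberA (e : Int) (L : List Int) : Bool :=
  match L with
  | [] => false
  | x :: xs => if e = x then true else isMemberA e xs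

def NbUnion (H1 : List Int) (H2 : List Int) : Int :=
  match H1 with
  | [] =>
    if H2 = [] then 0   -- Python raises IndexError here (H1 and H2 both empty); excluded by Pre_NbUnion
    else 0              -- "IsEmpty(H1) and not IsEmpty(H2)" branch
  | x :: t =>
    if H2 = [] then 0   -- "not IsEmpty(H1) and IsEmpty(H2)" branch
    else if isMemberA x H2 then 1 + NbUnion t H2
    else 2 + NbUnion t H2

-- ===== PORT B =====
def NbUnion_alt (H1 : List Int) (H2 : List Int) : Int :=
  if H2 = [] then 0
  else
    let members : PySem.Set Int := PySem.Set.ofList H2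
    H1.foldl (fun total x => total + (if members.contains x then 1 else 2)) 0

-- ===== PRECONDITION & SPEC =====
-- Pre_ excludes exactly the input ([], []) on which A raises IndexError.
def Pre_NbUnion (H1 : List Int) (H2 : List Int) : Prop := ¬ (H1 = [] ∧ H2 = [])
instance (H1 : List Int) (H2 : List Int) : Decidable (Pre_NbUnion H1 H2) := by unfold Pre_NbUnion; infer_instance
def pvWitness_NbUnion : List Int × List Int := ([1, 2, 3], [2, 5])

-- A raises IndexError when both H1 and H2 are empty (it reads H1[0]); B returns 0 there.
def Raises_NbUnion (H1 : List Int) (H2 : List Int) : Prop := H1 = [] ∧ H2 = []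
instance (H1 : List Int) (H2 : List Int) : Decidable (Raises_NbUnion H1 H2) := by unfold Raises_NbUnion; infer_instance
def pvRaiseWitness_NbUnion : List Int × List Int := ([], [])
def pvRaiseWitnessOut_NbUnion : Int := 0

def Spec_NbUnion (H1 : List Int) (H2 : List Int) (out : Int) : Prop := out = NbUnion_alt H1 H2
instance (H1 : List Int) (H2 : List Int) (out : Int) : Decidable (Spec_NbUnion H1 H2 out) := by unfold Spec_NbUnion; infer_instance

-- ===== CLAIM =====
def Claim_equal_NbUnion : Prop := ∀ (H1 : List Int) (H2 : List Int), Dom_NbUnion H1 H2 → Pre_NbUnion H1 H2 → Spec_NbUnion H1 H2 (NbUnion H1 H2)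
def Claim_raises_NbUnion : Prop := (∀ (H1 : List Int) (H2 : List Int), Dom_NbUnion H1 H2 → Raises_NbUnion H1 H2 → ¬ Pre_NbUnion H1 H2) ∧ (Dom_NbUnion (pvRaiseWitness_NbUnion.1) (pvRaiseWitness_NbUnion.2) ∧ Raises_NbUnion (pvRaiseWitness_NbUnion.1) (pvRaiseWitness_NbUnion.2) ∧ NbUnion_alt (pvRaiseWitness_NbUnion.1) (pvRaiseWitness_NbUnion.2) = pvRaiseWitnessOut_NbUnion)

-- ===== LEMMAS AND PROOFS =====
theorem isMemberA_eq_mem (e : Int) (L : List Int) : isMemberA e L = decide (e ∈ L) := by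
  induction L with
  | nil => simp [isMemberA]
  | cons x xs ih => by_cases h : e = x <;> simp [isMemberA, h, ih]

theorem foldl_acc (H1 : List Int) (H2 : List Int) (acc : Int) :
    H1.foldl (fun total x => total + (if (PySem.Set.ofList H2).contains x then 1 else 2)) acc
      = acc + H1.foldl (fun total x => total + (if (PySem.Set.ofList H2).contains x then 1 else 2)) 0 := by
  induction H1 generalizing acc with
  | nil => simp
  | cons x t ih =>
    simp only [List.foldl_cons]
    rw [ih, ih (0 + _)]
    ring

theorem NbUnion_eq (H1 : List Int) (H2 : List Int) (h2 : H2 ≠ []) :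
    NbUnion H1 H2 = NbUnion_alt H1 H2 := by
  induction H1 with
  | nil => simp [NbUnion, NbUnion_alt, h2]
  | cons x t ih =>
    simp only [NbUnion, NbUnion_alt, if_neg h2] at ih ⊢
    rw [isMemberA_eq_mem, List.foldl_cons, foldl_acc, ih]
    by_cases hm : x ∈ H2 <;> simp [hm, PySem.Set.mem_ofList]

-- ===== VERDICT =====
theorem NbUnion_raises : Claim_raises_NbUnion := by
  unfold Claim_raises_NbUnion
  exact ⟨fun H1 H2 _ hr hp => hp hr, by decide⟩

theorem NbUnion_spec : Claim_equal_NbUnion := by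
  intro H1 H2 hdom hpre
  unfold Spec_NbUnion
  by_cases h2 : H2 = []
  · subst h2
    cases H1 with
    | nil => exact absurd hpre (NbUnion_raises.1 [] [] hdom ⟨rfl, rfl⟩)
    | cons x t => simp [NbUnion, NbUnion_alt]
  · exact NbUnion_eq H1 H2 h2
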